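-- pv_equiv track=rewrite | github.com/freedom-xiao007/LeetCode | src/compelite/5508.py | _f
-- ===== SOURCE A (Python) =====
-- def _f(nums1, nums2, d):
--     count = 0
--     for i in range(0, len(nums1)):
--         for j in range(0, len(nums2)):
--             p = nums1[i]**2
--             if p < nums2[j] or p % nums2[j] != 0:
--                 continue
--             other = p // nums2[j]
--             if other in d:
--                 for index in d[other]:
--                     if index > j:
--                         count += 1
--     return count
-- ===== SOURCE B (Python) =====
-- def _f(nums1, nums2, d):
--     # Count nums1 values by their square once, then run the nums2 scan a single
--     # time per DISTINCT square and weight it by the multiplicity.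
--     freq = {}
--     for x in nums1:
--         p = x ** 2
--         freq[p] = freq.get(p, 0) + 1
--     total = 0
--     for p, c in freq.items():
--         s = 0
--         for j in range(len(nums2)):
--             q = nums2[j]
--             if q <= p and p % q == 0:
--                 lst = d.get(p // q)
--                 if lst is not None:
--                     for index in lst:
--                         if index > j:
--                             s += 1
--         total += c * s
--     return total
-- ===== Notes on version B (the rewrite author's own statement) =====
-- stated objective: faster
-- what changed: B first aggregates nums1 into a frequency map of distinct squares in one pass, then runs the nums2/d scan once per distinct square and multiplies by its multiplicity, instead of repeating the full inner scan (and its per-iteration indexing, squaring and dict probing) for every index of nums1.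
import Mathlib
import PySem

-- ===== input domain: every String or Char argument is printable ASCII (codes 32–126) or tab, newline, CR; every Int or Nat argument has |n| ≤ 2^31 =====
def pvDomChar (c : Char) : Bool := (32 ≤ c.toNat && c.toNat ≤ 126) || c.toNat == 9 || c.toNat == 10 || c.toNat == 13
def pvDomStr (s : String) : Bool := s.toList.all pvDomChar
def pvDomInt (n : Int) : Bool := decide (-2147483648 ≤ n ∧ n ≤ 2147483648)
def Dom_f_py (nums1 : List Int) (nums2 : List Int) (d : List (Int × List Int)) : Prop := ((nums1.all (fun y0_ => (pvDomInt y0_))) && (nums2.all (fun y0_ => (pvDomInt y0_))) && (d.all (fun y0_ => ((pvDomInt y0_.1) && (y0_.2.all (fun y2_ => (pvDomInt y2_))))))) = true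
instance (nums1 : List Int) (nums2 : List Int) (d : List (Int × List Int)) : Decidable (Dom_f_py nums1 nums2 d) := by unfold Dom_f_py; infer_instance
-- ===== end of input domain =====

-- B aggregates nums1 by distinct squares (one counting pass) and runs the inner nums2/d scan
-- once per distinct square, weighted by multiplicity, instead of once per index of nums1.

-- ===== PORT A =====
def f_py (nums1 : List Int) (nums2 : List Int) (d : List (Int × List Int)) : Int :=
  (PySem.List.pyRange 0 (nums1.length : Int)).foldl (fun count i =>
    (PySem.List.pyRange 0 (nums2.length : Int)).foldl (fun count j =>
      let p := (PySem.List.pyGetD nums1 i 0) ^ 2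
      let q := PySem.List.pyGetD nums2 j 0
      if p < q ∨ PySem.Int.mod p q ≠ 0 then count
      else
        let other := PySem.Int.floordiv p q
        if (PySem.Dict.mk d).contains other then
          ((PySem.Dict.mk d).getD other []).foldl
            (fun count idx => if idx > j then count + 1 else count) count
        else count) count) 0

-- ===== PORT B =====
def f_py_alt (nums1 : List Int) (nums2 : List Int) (d : List (Int × List Int)) : Int :=
  let freq : PySem.Dict Int Int :=
    nums1.foldl (fun fr x =>
      let p := x ^ 2
      fr.insert p (fr.getD p 0 + 1)) PySem.Dict.empty
  let dd := PySem.Dict.mk d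
  freq.items.foldl (fun total pc =>
    let s := (PySem.List.pyRange 0 (nums2.length : Int)).foldl (fun s j =>
      let q := PySem.List.pyGetD nums2 j 0
      if q ≤ pc.1 ∧ PySem.Int.mod pc.1 q = 0 then
        match dd.get? (PySem.Int.floordiv pc.1 q) with
        | some lst => lst.foldl (fun c idx => if idx > j then c + 1 else c) s
        | none => s
      else s) 0
    total + pc.2 * s) 0

-- ===== PRECONDITION & SPEC =====
-- Pre_ excludes exactly the inputs where A raises ZeroDivisionError: nums1 non-empty and 0 ∈ nums2
-- (then p % 0 is evaluated, since p = nums1[i]**2 ≥ 0 makes 'p < 0' false).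
def Pre_f_py (nums1 : List Int) (nums2 : List Int) (d : List (Int × List Int)) : Prop :=
  nums1 = [] ∨ (0 : Int) ∉ nums2
instance (nums1 : List Int) (nums2 : List Int) (d : List (Int × List Int)) : Decidable (Pre_f_py nums1 nums2 d) := by unfold Pre_f_py; infer_instance

def pvWitness_f_py : List Int × List Int × (List (Int × List Int)) := ([1], [1], [(1, [0, 2])])

def Spec_f_py (nums1 : List Int) (nums2 : List Int) (d : List (Int × List Int)) (out : Int) : Prop := out = f_py_alt nums1 nums2 d
instance (nums1 : List Int) (nums2 : List Int) (d : List (Int × List Int)) (out : Int) : Decidable (Spec_f_py nums1 nums2 d out) := by unfold Spec_f_py; infer_instance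

-- ===== CLAIM (what is proved, stated in full; the proofs are below) =====
def Claim_equal_f_py : Prop := ∀ (nums1 : List Int) (nums2 : List Int) (d : List (Int × List Int)), Dom_f_py nums1 nums2 d → Pre_f_py nums1 nums2 d → Spec_f_py nums1 nums2 d (f_py nums1 nums2 d)

-- ===== LEMMAS AND PROOFS =====

-- per-j contribution for a fixed square p, and its sum over all j
def pvH (nums2 : List Int) (dd : PySem.Dict Int (List Int)) (p : Int) (j : Int) : Int :=
  let q := PySem.List.pyGetD nums2 j 0
  if q ≤ p ∧ PySem.Int.mod p q = 0 then
    match dd.get? (PySem.Int.floordiv p q) with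
    | some lst => (lst.countP (fun idx => decide (j < idx)) : Int)
    | none => 0
  else 0

def pvS (nums2 : List Int) (dd : PySem.Dict Int (List Int)) (p : Int) : Int :=
  ((PySem.List.pyRange 0 (nums2.length : Int)).map (pvH nums2 dd p)).sum

theorem pv_foldl_shift {α : Type} (body : Int → α → Int) (h : α → Int)
    (hb : ∀ a x, body a x = a + h x) :
    ∀ (l : List α) (a : Int), l.foldl body a = a + (l.map h).sum := by
  intro l
  induction l with
  | nil => intro a; simp
  | cons x t ih => intro a; simp [List.foldl_cons, hb, ih, add_assoc]

theorem pv_inner_count (j : Int) (lst : List Int) (a : Int) :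
    lst.foldl (fun c idx => if idx > j then c + 1 else c) a
      = a + (lst.countP (fun idx => decide (j < idx)) : Int) := by
  have := PySem.List.foldl_count_if (fun idx => decide (j < idx)) lst a
  simpa [gt_iff_lt] using this

theorem pv_A_body (nums2 : List Int) (dd : PySem.Dict Int (List Int)) (p : Int)
    (count j : Int) :
    (let q := PySem.List.pyGetD nums2 j 0
     if p < q ∨ PySem.Int.mod p q ≠ 0 then count
     else
       let other := PySem.Int.floordiv p q
       if dd.contains other then
         (dd.getD other []).foldl (fun count idx => if idx > j then count + 1 else count) count
       else count)
      = count + pvH nums2 dd p j := by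
  dsimp only [pvH]
  set q := PySem.List.pyGetD nums2 j 0 with hq
  by_cases h1 : p < q ∨ PySem.Int.mod p q ≠ 0
  · have h2 : ¬ (q ≤ p ∧ PySem.Int.mod p q = 0) := by
      rcases h1 with h | h
      · exact fun hc => absurd hc.1 (not_le.mpr h)
      · exact fun hc => h hc.2
    simp [h1, h2]
  · have h2 : q ≤ p ∧ PySem.Int.mod p q = 0 := by
      push_neg at h1; exact h1
    cases hget : dd.get? (PySem.Int.floordiv p q) with
    | none =>
      have hc : dd.contains (PySem.Int.floordiv p q) = false :=
        (PySem.Dict.get?_eq_none_iff_contains dd _).mp hget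
      simp [h2, hc]
    | some lst =>
      have hc : dd.contains (PySem.Int.floordiv p q) = true := by
        by_contra hcf
        have : dd.get? (PySem.Int.floordiv p q) = none :=
          (PySem.Dict.get?_eq_none_iff_contains dd _).mpr (by simpa using hcf)
        simp [this] at hget
      have hgd : dd.getD (PySem.Int.floordiv p q) [] = lst := by
        rw [PySem.Dict.getD_eq_get?_getD, hget]; rfl
      rw [if_neg h1, if_pos hc, hgd, if_pos h2]
      exact pv_inner_count j lst count

theorem pv_B_body (nums2 : List Int) (dd : PySem.Dict Int (List Int)) (p : Int)
    (s j : Int) :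
    (let q := PySem.List.pyGetD nums2 j 0
     if q ≤ p ∧ PySem.Int.mod p q = 0 then
       match dd.get? (PySem.Int.floordiv p q) with
       | some lst => lst.foldl (fun c idx => if idx > j then c + 1 else c) s
       | none => s
     else s)
      = s + pvH nums2 dd p j := by
  dsimp only [pvH]
  by_cases h2 : PySem.List.pyGetD nums2 j 0 ≤ p ∧ PySem.Int.mod p (PySem.List.pyGetD nums2 j 0) = 0
  · cases hget : dd.get? (PySem.Int.floordiv p (PySem.List.pyGetD nums2 j 0)) with
    | none => simp [h2]
    | some lst => simp only [if_pos h2]; exact pv_inner_count j lst s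
  · simp [h2]

theorem pv_sum_if_eq (g : Int → Int) :
    ∀ (L : List Int), L.Nodup → ∀ y ∈ L,
      (L.map (fun k => if k = y then g k else 0)).sum = g y := by
  intro L
  induction L with
  | nil => intro _ y hy; cases hy
  | cons a L ih =>
    intro hN y hy
    have hna : a ∉ L := (List.nodup_cons.mp hN).1
    have hN' : L.Nodup := (List.nodup_cons.mp hN).2
    rcases List.mem_cons.mp hy with rfl | hyL
    · have hz : (L.map (fun k => if k = y then g k else 0)).sum = 0 := by
        apply List.sum_eq_zero
        intro x hx
        rcases List.mem_map.mp hx with ⟨k, hk, rfl⟩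
        have : k ≠ y := fun h => hna (h ▸ hk)
        simp [this]
      simp [hz]
    · have hay : a ≠ y := fun h => hna (h ▸ hyL)
      simp [hay, ih hN' y hyL]

theorem pv_count_sum (g : Int → Int) (L : List Int) (hN : L.Nodup) :
    ∀ (ys : List Int), (∀ y ∈ ys, y ∈ L) →
      (L.map (fun k => ((ys.count k : Int)) * g k)).sum = (ys.map g).sum := by
  intro ys
  induction ys with
  | nil => intro _; simp
  | cons y t ih =>
    intro hmem
    have hpt : (L.map (fun k => (((y :: t).count k : Int)) * g k))
        = L.map (fun k => ((t.count k : Int) * g k) + (if k = y then g k else 0)) := by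
      apply List.map_congr_left
      intro k _
      by_cases hk : k = y
      · subst hk; push_cast [List.count_cons]; simp; ring
      · simp [hk, Ne.symm hk]
    rw [hpt, List.sum_map_add, ih (fun z hz => hmem z (List.mem_cons_of_mem _ hz)),
      pv_sum_if_eq g L hN y (hmem y (List.mem_cons_self ..))]
    simp [add_comm]

theorem pv_A_eq (nums1 nums2 : List Int) (d : List (Int × List Int)) :
    f_py nums1 nums2 d
      = ((nums1.map (fun x => x ^ 2)).map (pvS nums2 (PySem.Dict.mk d))).sum := by
  unfold f_py
  refine (pv_foldl_shift _ (fun i => pvS nums2 (PySem.Dict.mk d) ((PySem.List.pyGetD nums1 i 0) ^ 2)) ?_ _ _).trans ?_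
  · intro a i
    refine (pv_foldl_shift _ (pvH nums2 (PySem.Dict.mk d) ((PySem.List.pyGetD nums1 i 0) ^ 2)) ?_ _ _).trans ?_
    · intro s j
      exact pv_A_body nums2 (PySem.Dict.mk d) _ s j
    · rfl
  · rw [zero_add,
      show (fun i => pvS nums2 (PySem.Dict.mk d) ((PySem.List.pyGetD nums1 i 0) ^ 2))
        = ((pvS nums2 (PySem.Dict.mk d)) ∘ (fun x => x ^ 2)) ∘ (fun i => PySem.List.pyGetD nums1 i 0) from rfl,
      ← List.map_map, PySem.List.map_pyGetD_pyRange_zero', List.map_map]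

theorem pv_B_eq (nums1 nums2 : List Int) (d : List (Int × List Int)) :
    f_py_alt nums1 nums2 d
      = ((PySem.Set.ofList (nums1.map (fun x => x ^ 2))).map
          (fun k => (((nums1.map (fun x => x ^ 2)).count k : Int)) * pvS nums2 (PySem.Dict.mk d) k)).sum := by
  unfold f_py_alt
  have hfreq : nums1.foldl (fun fr x =>
        let p := x ^ 2
        fr.insert p (fr.getD p 0 + 1)) (PySem.Dict.empty : PySem.Dict Int Int)
      = PySem.Dict.counter (nums1.map (fun x => x ^ 2)) := by
    rw [← PySem.Dict.foldl_insert_getD_add_one_eq_counter, List.foldl_map]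
  dsimp only
  rw [hfreq, PySem.Dict.items_counter]
  refine (pv_foldl_shift _ (fun pc : Int × Int => pc.2 * pvS nums2 (PySem.Dict.mk d) pc.1) ?_ _ _).trans ?_
  · intro a pc
    dsimp only
    congr 1
    congr 1
    refine (pv_foldl_shift _ (pvH nums2 (PySem.Dict.mk d) pc.1) ?_ _ _).trans ?_
    · intro s j
      exact pv_B_body nums2 (PySem.Dict.mk d) _ s j
    · rw [zero_add]; rfl
  · rw [zero_add, List.map_map]
    rfl

-- ===== VERDICT (by name: the statement is the Claim_ definition above) =====
theorem f_py_spec : Claim_equal_f_py := by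
  intro nums1 nums2 d _ _
  unfold Spec_f_py
  rw [pv_A_eq, pv_B_eq]
  exact (pv_count_sum (pvS nums2 (PySem.Dict.mk d)) _ (PySem.Set.nodup_ofList _)
    _ (fun y hy => (PySem.Set.mem_ofList _ y).mpr hy)).symm
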